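-- pv_equiv track=rewrite | github.com/justDabuK/advent-of-code | 2021/12.py | has_only_one_lower_cave_twice
-- ===== SOURCE A (Python) =====
-- def has_only_one_lower_cave_twice(path):
--     lower_cave_occurs_twice = 0
--     more_than_twice_counter = 0
--     lower_caves_in_path = list(filter(lambda x: x.islower(), path))
--     caves_without_duplicates = list(dict.fromkeys(lower_caves_in_path))
--     for cave in caves_without_duplicates:
--         if lower_caves_in_path.count(cave) == 2:
--             lower_cave_occurs_twice += 1
--         elif lower_caves_in_path.count(cave) > 2:
--             more_than_twice_counter += 1
--     if more_than_twice_counter > 0 or lower_cave_occurs_twice > 1: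
--         return False
--     else:
--         return True
-- ===== SOURCE B (Python) =====
-- def has_only_one_lower_cave_twice(path):
--     lower = [x for x in path if x.islower()]
--     return len(lower) - len(set(lower)) <= 1
-- ===== Notes on version B (the rewrite author's own statement) =====
-- stated objective: faster
-- what changed: Replaces the dedup-then-per-cave counting loop (lower.count(cave) rescans the list for every distinct cave) with the cardinality identity: the number of duplicate occurrences among lowercase caves is len(lower)-len(set(lower)), and the path is valid iff that is at most 1.
import Mathlib
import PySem

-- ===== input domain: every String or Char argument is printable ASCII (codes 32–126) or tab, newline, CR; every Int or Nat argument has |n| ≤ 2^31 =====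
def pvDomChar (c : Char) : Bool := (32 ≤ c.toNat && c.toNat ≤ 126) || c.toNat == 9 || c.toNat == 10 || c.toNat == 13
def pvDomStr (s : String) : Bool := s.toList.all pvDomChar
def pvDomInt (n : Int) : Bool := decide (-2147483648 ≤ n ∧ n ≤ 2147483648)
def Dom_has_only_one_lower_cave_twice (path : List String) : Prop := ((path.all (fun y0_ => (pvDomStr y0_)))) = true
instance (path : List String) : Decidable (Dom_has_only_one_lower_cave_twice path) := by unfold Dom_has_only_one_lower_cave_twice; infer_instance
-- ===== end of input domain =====

-- B replaces A's per-cave counting loop (list.count inside a loop, quadratic) by the cardinality identity len(lower) - len(set(lower)) <= 1 (faster, one pass plus a set build).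


-- ===== PORT A =====
-- shared primitive: Python str.islower() — exact on ASCII (some cased char, and no uppercase char)
def pvStrIslower (s : String) : Bool :=
  s.toList.any (fun c => PySem.Chars.islower c) && s.toList.all (fun c => !PySem.Chars.isupper c)

def has_only_one_lower_cave_twice (path : List String) : Bool :=
  let lower_caves_in_path := path.filter (fun x => pvStrIslower x)
  let caves_without_duplicates := PySem.List.dedup lower_caves_in_path  -- list(dict.fromkeys(..))
  let st := caves_without_duplicates.foldl
    (fun (st : Nat × Nat) cave =>
      if PySem.List.count lower_caves_in_path cave = 2 then (st.1 + 1, st.2)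
      else if 2 < PySem.List.count lower_caves_in_path cave then (st.1, st.2 + 1)
      else st) (0, 0)
  if 0 < st.2 ∨ 1 < st.1 then false else true

-- ===== PORT B =====
def has_only_one_lower_cave_twice_alt (path : List String) : Bool :=
  let lower := path.filter (fun x => pvStrIslower x)
  decide ((lower.length : Int) - ((PySem.Set.ofList lower : List String).length : Int) ≤ 1)

-- ===== PRECONDITION & SPEC =====
def Spec_has_only_one_lower_cave_twice (path : List String) (out : Bool) : Prop := out = has_only_one_lower_cave_twice_alt path
instance (path : List String) (out : Bool) : Decidable (Spec_has_only_one_lower_cave_twice path out) := by unfold Spec_has_only_one_lower_cave_twice; infer_instance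

-- ===== CLAIM (what is proved, stated in full; the proofs are below) =====
def Claim_equal_has_only_one_lower_cave_twice : Prop := ∀ (path : List String), Dom_has_only_one_lower_cave_twice path → Spec_has_only_one_lower_cave_twice path (has_only_one_lower_cave_twice path)

-- ===== LEMMAS AND PROOFS =====

-- A's loop counts, over the dedup list, the caves occurring exactly twice and those occurring more than twice.
theorem pv_loop_eq (l d : List String) (a b : Nat) :
    d.foldl (fun (st : Nat × Nat) cave =>
      if PySem.List.count l cave = 2 then (st.1 + 1, st.2)
      else if 2 < PySem.List.count l cave then (st.1, st.2 + 1)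
      else st) (a, b)
    = (a + d.countP (fun c => PySem.List.count l c = 2),
       b + d.countP (fun c => decide (2 < PySem.List.count l c) && !(decide (PySem.List.count l c = 2)))) := by
  induction d generalizing a b with
  | nil => simp
  | cons x xs ih =>
    rw [List.foldl_cons, List.countP_cons, List.countP_cons]
    by_cases h2 : PySem.List.count l x = 2
    · rw [if_pos h2, ih]
      rw [PySem.List.count_eq] at h2
      simp [h2, Prod.ext_iff]
      omega
    · rw [if_neg h2]
      by_cases h3 : 2 < PySem.List.count l x
      · rw [if_pos h3, ih]
        rw [PySem.List.count_eq] at h2 h3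
        simp [h2, h3, Prod.ext_iff]
        omega
      · rw [if_neg h3, ih]
        rw [PySem.List.count_eq] at h2 h3
        simp [h2, h3]

-- the total count over a list of members of l, split into length plus duplicate excess
theorem pv_sum_count (l : List String) (d : List String) (h1 : ∀ c ∈ d, 1 ≤ PySem.List.count l c) :
    (d.map (fun c => PySem.List.count l c)).sum
      = d.length + (d.map (fun c => PySem.List.count l c - 1)).sum := by
  induction d with
  | nil => simp
  | cons x xs ih =>
    have hx := h1 x (by simp)
    have hxs := ih (fun c hc => h1 c (by simp [hc]))
    simp only [List.map_cons, List.sum_cons, List.length_cons, hxs]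
    omega

-- twice-count + 2 * thrice-count ≤ total duplicate excess
theorem pv_excess_lb (l : List String) (d : List String) (h1 : ∀ c ∈ d, 1 ≤ PySem.List.count l c) :
    d.countP (fun c => PySem.List.count l c = 2)
      + 2 * d.countP (fun c => decide (2 < PySem.List.count l c) && !(decide (PySem.List.count l c = 2)))
      ≤ (d.map (fun c => PySem.List.count l c - 1)).sum := by
  induction d with
  | nil => simp
  | cons x xs ih =>
    have hx := h1 x (by simp)
    have hxs := ih (fun c hc => h1 c (by simp [hc]))
    rw [List.countP_cons, List.countP_cons, List.map_cons, List.sum_cons]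
    rw [PySem.List.count_eq] at hx
    simp only [PySem.List.count_eq] at hxs ⊢
    by_cases h2 : List.count x l = 2 <;> by_cases h3 : 2 < List.count x l <;>
      (try simp [h2, h3]) <;> omega

-- with no cave occurring more than twice, the duplicate excess IS the twice-count
theorem pv_excess_eq (l : List String) (d : List String) (h1 : ∀ c ∈ d, 1 ≤ PySem.List.count l c)
    (h0 : d.countP (fun c => decide (2 < PySem.List.count l c) && !(decide (PySem.List.count l c = 2))) = 0) :
    (d.map (fun c => PySem.List.count l c - 1)).sum = d.countP (fun c => PySem.List.count l c = 2) := by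
  induction d with
  | nil => simp
  | cons x xs ih =>
    have hx := h1 x (by simp)
    rw [PySem.List.count_eq] at hx
    rw [List.countP_cons] at h0 ⊢
    rw [List.map_cons, List.sum_cons]
    have hxs0 : xs.countP (fun c => decide (2 < PySem.List.count l c) && !(decide (PySem.List.count l c = 2))) = 0 := by omega
    have hxs := ih (fun c hc => h1 c (by simp [hc])) hxs0
    rw [hxs]
    simp only [PySem.List.count_eq] at h0 ⊢
    by_cases h2 : List.count x l = 2 <;> by_cases h3 : 2 < List.count x l <;>
      (try simp [h2] at h0) <;> (try simp [h2, h3]) <;> omega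

-- sum of counts over PySem's dedup equals the length of the list
theorem pv_dedup_sum (l : List String) :
    ((PySem.List.dedup l).map (fun c => PySem.List.count l c)).sum = l.length := by
  have hperm : (PySem.List.dedup l).Perm l.dedup :=
    (List.perm_ext_iff_of_nodup (PySem.List.nodup_dedup l) l.nodup_dedup).mpr
      (fun a => by rw [PySem.List.mem_dedup, List.mem_dedup])
  simp only [PySem.List.count_eq]
  rw [(hperm.map (fun c => List.count c l)).sum_eq]
  exact List.sum_map_count_dedup_eq_length l

-- ===== VERDICT (by name: the statement is the Claim_ definition above) =====
theorem has_only_one_lower_cave_twice_spec : Claim_equal_has_only_one_lower_cave_twice := by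
  unfold Claim_equal_has_only_one_lower_cave_twice
  intro path _
  unfold Spec_has_only_one_lower_cave_twice
  dsimp only [has_only_one_lower_cave_twice, has_only_one_lower_cave_twice_alt]
  rw [← PySem.List.dedup_eq_ofList, pv_loop_eq]
  set l := path.filter (fun x => pvStrIslower x) with hl
  set d := PySem.List.dedup l with hd
  have h1 : ∀ c ∈ d, 1 ≤ PySem.List.count l c := by
    intro c hc
    rw [PySem.List.count_eq]
    exact List.count_pos_iff.mpr ((PySem.List.mem_dedup l c).mp hc)
  have hsum := pv_sum_count l d h1
  have hded := pv_dedup_sum l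
  set t := d.countP (fun c => PySem.List.count l c = 2) with ht
  set m := d.countP (fun c => decide (2 < PySem.List.count l c) && !(decide (PySem.List.count l c = 2))) with hm
  set S := (d.map (fun c => PySem.List.count l c - 1)).sum with hS
  have hlb := pv_excess_lb l d h1
  rw [← ht, ← hm, ← hS] at hlb
  have hlen : l.length = d.length + S := by rw [← hded]; exact hsum
  by_cases hcond : 0 < (0 + t, 0 + m).2 ∨ 1 < (0 + t, 0 + m).1
  · rw [if_pos hcond]
    symm
    rw [decide_eq_false_iff_not]
    omega
  · rw [if_neg hcond]
    symm
    rw [decide_eq_true_eq]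
    simp only [not_or, not_lt] at hcond
    have hm0 : m = 0 := by omega
    have heq := pv_excess_eq l d h1 (by rw [← hm]; exact hm0)
    rw [← ht, ← hS] at heq
    omega
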